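-- pv_equiv track=rewrite | github.com/ElCresp0/Systems-of-Linear-Equations-with-Python | funkcje.py | initializeA
-- ===== SOURCE A (Python) =====
-- def initializeMat(cols, rows, val):
--     ret = []
--     for i in range(rows):
--         ret.append([])
--         for _ in range(cols):
--             ret[i].append(val)
--     return ret
--
-- def initializeA(N, a1, a2, a3):
--     A = initializeMat(N, N, 0)
--     for row in range(N):
--         for col in range(N):
--             if row == col:
--                 A[row][col] = a1
--             elif abs(row - col) == 1:
--                 A[row][col] = a2
--             elif abs(row - col) == 2:
--                 A[row][col] = a3
--             # else:
--             #      A[row][col] = 0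
--     return A
-- ===== SOURCE B (Python) =====
-- def initializeA(N, a1, a2, a3):
--     # one padded band pattern, each row is a slice of it (no per-cell branching)
--     pad = [0] * N + [a3, a2, a1, a2, a3] + [0] * N
--     return [pad[N + 2 - i : 2 * N + 2 - i] for i in range(N)]
-- ===== Notes on version B (the rewrite author's own statement) =====
-- stated objective: simpler
-- what changed: B replaces A's zero-matrix construction plus per-cell abs(row-col) branch scan with building the five-diagonal band pattern once and slicing one window of it per row.
import Mathlib
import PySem

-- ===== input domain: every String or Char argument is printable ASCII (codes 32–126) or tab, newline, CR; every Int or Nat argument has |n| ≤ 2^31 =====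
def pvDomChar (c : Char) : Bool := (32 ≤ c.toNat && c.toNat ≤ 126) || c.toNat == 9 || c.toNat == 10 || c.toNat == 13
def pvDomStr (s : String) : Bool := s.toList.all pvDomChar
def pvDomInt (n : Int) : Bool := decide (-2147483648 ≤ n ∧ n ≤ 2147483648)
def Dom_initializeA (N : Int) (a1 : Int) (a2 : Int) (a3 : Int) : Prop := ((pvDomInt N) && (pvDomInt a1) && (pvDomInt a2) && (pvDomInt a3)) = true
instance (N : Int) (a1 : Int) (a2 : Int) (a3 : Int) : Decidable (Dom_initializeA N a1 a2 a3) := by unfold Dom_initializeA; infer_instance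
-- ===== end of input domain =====

-- B builds the five-diagonal band pattern once and takes one slice of it per row,
-- instead of A's per-cell abs(row-col) branch over an explicitly zero-filled matrix; objective: simpler.

-- ===== PORT A =====
def initializeMat (cols : Int) (rows : Int) (val : Int) : List (List Int) :=
  (PySem.List.pyRange 0 rows 1).foldl
    (fun ret i =>
      let ret := ret ++ [([] : List Int)]
      (PySem.List.pyRange 0 cols 1).foldl
        (fun ret _ => PySem.List.pySetD ret i (PySem.List.pyGetD ret i [] ++ [val])) ret)
    []

def initializeA (N : Int) (a1 : Int) (a2 : Int) (a3 : Int) : List (List Int) :=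
  (PySem.List.pyRange 0 N 1).foldl
    (fun A row =>
      (PySem.List.pyRange 0 N 1).foldl
        (fun A col =>
          if row = col then
            PySem.List.pySetD A row (PySem.List.pySetD (PySem.List.pyGetD A row []) col a1)
          else if (row - col).natAbs = 1 then
            PySem.List.pySetD A row (PySem.List.pySetD (PySem.List.pyGetD A row []) col a2)
          else if (row - col).natAbs = 2 then
            PySem.List.pySetD A row (PySem.List.pySetD (PySem.List.pyGetD A row []) col a3)
          else A) A)
    (initializeMat N N 0)

-- ===== PORT B =====
def initializeA_alt (N : Int) (a1 : Int) (a2 : Int) (a3 : Int) : List (List Int) :=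
  let pad := List.replicate N.toNat 0 ++ [a3, a2, a1, a2, a3] ++ List.replicate N.toNat 0
  (PySem.List.pyRange 0 N 1).map
    (fun i => PySem.List.slice pad (some (N + 2 - i)) (some (2 * N + 2 - i)))

-- ===== PRECONDITION & SPEC =====
def Spec_initializeA (N : Int) (a1 : Int) (a2 : Int) (a3 : Int) (out : List (List Int)) : Prop := out = initializeA_alt N a1 a2 a3
instance (N : Int) (a1 : Int) (a2 : Int) (a3 : Int) (out : List (List Int)) : Decidable (Spec_initializeA N a1 a2 a3 out) := by unfold Spec_initializeA; infer_instance

-- ===== CLAIM (what is proved, stated in full; the proofs are below) =====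
def Claim_equal_initializeA : Prop := ∀ (N : Int) (a1 : Int) (a2 : Int) (a3 : Int), Dom_initializeA N a1 a2 a3 → Spec_initializeA N a1 a2 a3 (initializeA N a1 a2 a3)

-- ===== LEMMAS AND PROOFS =====

-- the value of cell (r, j) in both programs
def bandVal (a1 a2 a3 : Int) (r j : Nat) : Int :=
  if (r : Int) = (j : Int) then a1
  else if ((r : Int) - (j : Int)).natAbs = 1 then a2
  else if ((r : Int) - (j : Int)).natAbs = 2 then a3
  else 0

-- the common canonical matrix both ports are proved equal to
def bandMat (a1 a2 a3 : Int) (n : Nat) : List (List Int) :=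
  (List.range n).map fun r => (List.range n).map fun j => bandVal a1 a2 a3 r j

-- A's inner-loop body, restricted to the one row it modifies
def stepRow (a1 a2 a3 : Int) (r : Nat) (row : List Int) (j : Nat) : List Int :=
  if (r : Int) = (j : Int) then row.set j a1
  else if ((r : Int) - (j : Int)).natAbs = 1 then row.set j a2
  else if ((r : Int) - (j : Int)).natAbs = 2 then row.set j a3
  else row

-- A's inner-loop body at the matrix level (after pySetD/pyGetD reduce to set/getD)
def stepCell (a1 a2 a3 : Int) (r : Nat) (A : List (List Int)) (j : Nat) : List (List Int) :=
  if (r : Int) = (j : Int) then A.set r ((A.getD r []).set j a1)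
  else if ((r : Int) - (j : Int)).natAbs = 1 then A.set r ((A.getD r []).set j a2)
  else if ((r : Int) - (j : Int)).natAbs = 2 then A.set r ((A.getD r []).set j a3)
  else A

lemma pyRange_neg (N : Int) (h : N < 0) : PySem.List.pyRange 0 N 1 = [] := by
  simp [PySem.List.pyRange]; omega

-- ---- A side ----
lemma innerFill (v : Int) (c : Nat) (s : List (List Int)) (i : Nat) (hi : i < s.length) :
    (List.range c).foldl (fun ret _ => ret.set i (ret.getD i [] ++ [v])) s
      = s.set i (s.getD i [] ++ List.replicate c v) := by
  induction c with
  | zero =>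
    simp only [List.range_zero, List.foldl_nil, List.replicate_zero, List.append_nil]
    rw [List.getD_eq_getElem _ _ hi]
    exact (List.set_getElem_self ..).symm
  | succ c ih =>
    rw [List.range_succ, List.foldl_append, ih]
    simp only [List.foldl]
    have h1 : (s.set i (s.getD i [] ++ List.replicate c v)).getD i []
        = s.getD i [] ++ List.replicate c v := by
      rw [List.getD_eq_getElem _ _ (by simpa using hi)]
      exact List.getElem_set_self (by simpa using hi)
    rw [h1, List.set_set, List.append_assoc]
    simp [List.replicate_succ']

lemma initializeMat_eq (n : Nat) (v : Int) :
    initializeMat (n : Int) (n : Int) v = List.replicate n (List.replicate n v) := by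
  unfold initializeMat
  simp only [PySem.List.pyRange_zero_natCast, List.foldl_map,
    PySem.List.pySetD_natCast, PySem.List.pyGetD_natCast]
  suffices h : ∀ r : Nat,
      (List.range r).foldl
        (fun ret i =>
          (List.range n).foldl (fun ret _ => ret.set i (ret.getD i [] ++ [v]))
            (ret ++ [([] : List Int)])) []
        = List.replicate r (List.replicate n v) by
    exact h n
  intro r
  induction r with
  | zero => simp
  | succ r ih =>
    rw [List.range_succ, List.foldl_append, ih]
    simp only [List.foldl]
    rw [innerFill v n _ r (by simp)]
    have hlen : (List.replicate r (List.replicate n v)).length = r := by simp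
    have hg : ((List.replicate r (List.replicate n v)) ++ [([] : List Int)]).getD r [] = [] := by
      conv_lhs => rw [← hlen]
      simp [List.getD_eq_getElem?_getD]
    have hs : ((List.replicate r (List.replicate n v)) ++ [([] : List Int)]).set r (List.replicate n v)
        = List.replicate (r + 1) (List.replicate n v) := by
      conv_lhs => rw [← hlen]
      simp [List.replicate_succ']
    rw [hg]
    simpa using hs

lemma stepRow_length (a1 a2 a3 : Int) (r : Nat) (row : List Int) (j : Nat) :
    (stepRow a1 a2 a3 r row j).length = row.length := by
  unfold stepRow; split_ifs <;> simp

lemma rowFold_length (a1 a2 a3 : Int) (r m : Nat) (l : List Int) :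
    ((List.range m).foldl (stepRow a1 a2 a3 r) l).length = l.length := by
  induction m with
  | zero => simp
  | succ m ih =>
    rw [List.range_succ, List.foldl_append]
    simp only [List.foldl]
    rw [stepRow_length, ih]

lemma getD_set_int (row : List Int) (j t : Nat) (x : Int) (hj : j < row.length) :
    (row.set j x).getD t 0 = if t = j then x else row.getD t 0 := by
  rcases eq_or_ne t j with h | h
  · subst h
    rw [List.getD_eq_getElem _ _ (by simpa using hj), List.getElem_set_self (by simpa using hj)]
    simp
  · rw [List.getD_eq_getElem?_getD, List.getElem?_set_ne (by omega), ← List.getD_eq_getElem?_getD]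
    simp [h]

lemma stepRow_getD (a1 a2 a3 : Int) (r : Nat) (row : List Int) (j t : Nat)
    (hj : j < row.length) :
    (stepRow a1 a2 a3 r row j).getD t 0
      = if t = j then
          (if (r : Int) = (j : Int) then a1
           else if ((r : Int) - (j : Int)).natAbs = 1 then a2
           else if ((r : Int) - (j : Int)).natAbs = 2 then a3
           else row.getD t 0)
        else row.getD t 0 := by
  unfold stepRow
  split_ifs with h1 h2 h3 <;>
    first
    | (rw [getD_set_int _ _ _ _ hj]; split_ifs <;> rfl)
    | (split_ifs <;> rfl)
    | rfl

lemma rowFold_getD (a1 a2 a3 : Int) (r m : Nat) (l : List Int) (t : Nat) (hm : m ≤ l.length) :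
    ((List.range m).foldl (stepRow a1 a2 a3 r) l).getD t 0
      = if t < m then
          (if (r : Int) = (t : Int) then a1
           else if ((r : Int) - (t : Int)).natAbs = 1 then a2
           else if ((r : Int) - (t : Int)).natAbs = 2 then a3
           else l.getD t 0)
        else l.getD t 0 := by
  induction m with
  | zero => simp
  | succ m ih =>
    rw [List.range_succ, List.foldl_append]
    simp only [List.foldl]
    rw [stepRow_getD _ _ _ _ _ _ _ (by rw [rowFold_length]; omega)]
    rw [ih (by omega)]
    by_cases htm : t = m
    · subst htm; simp
    · simp only [htm, if_false]
      have : (t < m + 1) = (t < m) := by simp; omega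
      simp only [this]

lemma rowFold_zero (a1 a2 a3 : Int) (r n : Nat) :
    (List.range n).foldl (stepRow a1 a2 a3 r) (List.replicate n (0 : Int))
      = (List.range n).map (bandVal a1 a2 a3 r) := by
  apply List.ext_getElem
  · rw [rowFold_length]; simp
  · intro t h1 h2
    have ht : t < n := by simpa using h2
    rw [← List.getD_eq_getElem _ 0 h1, rowFold_getD a1 a2 a3 r n _ t (by simp)]
    simp [ht, bandVal, List.getD_eq_getElem?_getD]

lemma matFold (a1 a2 a3 : Int) (r m : Nat) (A : List (List Int)) (hr : r < A.length) :
    (List.range m).foldl (stepCell a1 a2 a3 r) A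
      = A.set r ((List.range m).foldl (stepRow a1 a2 a3 r) (A.getD r [])) := by
  induction m with
  | zero =>
    simp only [List.range_zero, List.foldl_nil]
    rw [List.getD_eq_getElem _ _ hr]
    exact (List.set_getElem_self ..).symm
  | succ m ih =>
    rw [List.range_succ, List.foldl_append, List.foldl_append, ih]
    simp only [List.foldl]
    have hget : (A.set r ((List.range m).foldl (stepRow a1 a2 a3 r) (A.getD r []))).getD r []
        = (List.range m).foldl (stepRow a1 a2 a3 r) (A.getD r []) := by
      rw [List.getD_eq_getElem _ _ (by simpa using hr)]
      exact List.getElem_set_self (by simpa using hr)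
    unfold stepCell
    split_ifs with h1 h2 h3
    · rw [hget, List.set_set]; unfold stepRow; rw [if_pos h1]
    · rw [hget, List.set_set]; unfold stepRow; rw [if_neg h1, if_pos h2]
    · rw [hget, List.set_set]; unfold stepRow; rw [if_neg h1, if_neg h2, if_pos h3]
    · unfold stepRow; rw [if_neg h1, if_neg h2, if_neg h3]

lemma outerFold (a1 a2 a3 : Int) (n m : Nat) (hm : m ≤ n) :
    (List.range m).foldl (fun A r => (List.range n).foldl (stepCell a1 a2 a3 r) A)
        (List.replicate n (List.replicate n 0))
      = (List.range n).map
          (fun r => if r < m then (List.range n).map (bandVal a1 a2 a3 r)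
                    else List.replicate n 0) := by
  induction m with
  | zero => simp [List.map_const']
  | succ m ih =>
    rw [List.range_succ, List.foldl_append, ih (by omega)]
    simp only [List.foldl]
    have hlen : ((List.range n).map
        (fun r => if r < m then (List.range n).map (bandVal a1 a2 a3 r)
                  else List.replicate n (0:Int))).length = n := by simp
    rw [matFold _ _ _ _ _ _ (by rw [hlen]; omega)]
    have hget : ((List.range n).map
        (fun r => if r < m then (List.range n).map (bandVal a1 a2 a3 r)
                  else List.replicate n (0:Int))).getD m [] = List.replicate n 0 := by
      rw [List.getD_eq_getElem _ _ (by rw [hlen]; omega)]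
      simp
    rw [hget, rowFold_zero]
    apply List.ext_getElem
    · simp [hlen]
    · intro t h1 h2
      have ht : t < n := by simpa using h2
      by_cases htm : t = m
      · subst htm
        rw [List.getElem_set_self (by simpa [hlen] using ht)]
        simp
      · rw [List.getElem_set_ne (by omega) (by simpa [hlen] using ht)]
        simp only [List.getElem_map, List.getElem_range]
        have h' : (t < m + 1) ↔ (t < m) := by omega
        simp only [h']

lemma A_eq (N a1 a2 a3 : Int) :
    initializeA N a1 a2 a3 = bandMat a1 a2 a3 N.toNat := by
  rcases lt_or_ge N 0 with h | h
  · unfold initializeA initializeMat bandMat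
    rw [pyRange_neg N h]
    simp [Int.toNat_of_nonpos h.le]
  · lift N to ℕ using h with n
    unfold initializeA
    rw [initializeMat_eq]
    simp only [PySem.List.pyRange_zero_natCast, List.foldl_map,
      PySem.List.pySetD_natCast, PySem.List.pyGetD_natCast]
    show (List.range n).foldl (fun A r => (List.range n).foldl (stepCell a1 a2 a3 r) A)
        (List.replicate n (List.replicate n 0)) = bandMat a1 a2 a3 ((n : Int)).toNat
    rw [outerFold a1 a2 a3 n n le_rfl]
    unfold bandMat
    rw [Int.toNat_natCast]
    exact List.map_congr_left fun r hr => if_pos (List.mem_range.mp hr)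

-- ---- B side ----
lemma padGet (a1 a2 a3 : Int) (n m : Nat) (hm : m < 2 * n + 5) :
    (List.replicate n 0 ++ [a3, a2, a1, a2, a3] ++ List.replicate n (0 : Int))[m]'(by simp; omega)
      = if m < n then 0
        else if m = n then a3
        else if m = n + 1 then a2
        else if m = n + 2 then a1
        else if m = n + 3 then a2
        else if m = n + 4 then a3
        else 0 := by
  rcases lt_or_ge m n with h | h
  · rw [List.getElem_append_left (by simp; omega), List.getElem_append_left (by simpa using h)]
    simp [h]
  · rcases lt_or_ge m (n + 5) with h2 | h2
    · rw [List.getElem_append_left (by simp; omega),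
        List.getElem_append_right (by simp; omega)]
      simp only [List.length_replicate]
      have h5 : m = n ∨ m = n + 1 ∨ m = n + 2 ∨ m = n + 3 ∨ m = n + 4 := by omega
      rcases h5 with rfl | rfl | rfl | rfl | rfl <;> simp
    · rw [List.getElem_append_right (by simp; omega)]
      simp only [List.getElem_replicate]
      split_ifs <;> first | rfl | omega

lemma rowSlice (a1 a2 a3 : Int) (n k : Nat) (hk : k < n) :
    (((List.replicate n 0 ++ [a3, a2, a1, a2, a3] ++ List.replicate n (0 : Int)).drop (n + 2 - k)).take n)
      = (List.range n).map (bandVal a1 a2 a3 k) := by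
  apply List.ext_getElem
  · simp; omega
  · intro t h1 h2
    have ht : t < n := by simpa using h2
    rw [List.getElem_take, List.getElem_drop]
    rw [padGet a1 a2 a3 n (n + 2 - k + t) (by omega)]
    simp only [List.getElem_map, List.getElem_range]
    unfold bandVal
    split_ifs <;> omega

lemma B_eq (N a1 a2 a3 : Int) :
    initializeA_alt N a1 a2 a3 = bandMat a1 a2 a3 N.toNat := by
  rcases lt_or_ge N 0 with h | h
  · unfold initializeA_alt bandMat
    rw [pyRange_neg N h]
    simp [Int.toNat_of_nonpos h.le]
  · lift N to ℕ using h with n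
    unfold initializeA_alt bandMat
    simp only [Int.toNat_natCast, PySem.List.pyRange_zero_natCast, List.map_map]
    apply List.map_congr_left
    intro k hk
    have hkn : k < n := List.mem_range.mp hk
    simp only [Function.comp]
    have e1 : ((n : Int) + 2 - (k : Int)) = ((n + 2 - k : Nat) : Int) := by omega
    have e2 : (2 * (n : Int) + 2 - (k : Int)) = ((2 * n + 2 - k : Nat) : Int) := by omega
    rw [e1, e2, PySem.List.slice_natCast]
    have e3 : (2 * n + 2 - k) - (n + 2 - k) = n := by omega
    rw [e3]
    exact rowSlice a1 a2 a3 n k hkn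

-- ===== VERDICT (by name: the statement is the Claim_ definition above) =====
theorem initializeA_spec : Claim_equal_initializeA := by
  intro N a1 a2 a3 _
  unfold Spec_initializeA
  rw [A_eq, B_eq]
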